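-- pv_equiv track=rewrite | github.com/Marwanyx/leetcode | num_jars.py | getScoreDifference
-- ===== SOURCE A (Python) =====
-- def getScoreDifference(numSeq):
--     # Write your code here
--     user1Score = 0
--     user2Score = 0
--     turn = 1
--     while len(numSeq) != 0:
--         score = numSeq.pop(0)
--         if score % 2 == 0:
--             numSeq.reverse()
--         if turn == 1:
--             user1Score = user1Score + score
--             turn = 2
--         else:
--             user2Score = user2Score + score
--             turn = 1
--     return user1Score - user2Score
-- ===== SOURCE B (Python) =====
-- def getScoreDifference(numSeq):
--     # Two-pointer simulation: popping the front of a list that gets reversed on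
--     # even values is the same as reading the original list from one end or the
--     # other, toggling the end on each even element.  O(n), no mutation of numSeq.
--     lo, hi = 0, len(numSeq) - 1
--     forward = True
--     diff = 0
--     sign = 1
--     while lo <= hi:
--         if forward:
--             x = numSeq[lo]
--             lo += 1
--         else:
--             x = numSeq[hi]
--             hi -= 1
--         if x % 2 == 0:
--             forward = not forward
--         diff += sign * x
--         sign = -sign
--     return diff
-- ===== Notes on version B (the rewrite author's own statement) =====
-- stated objective: faster
-- what changed: Replaced the pop(0)/list.reverse() mutation loop (each reversal is O(n)) by a two-pointer scan over the untouched list with a direction flag toggled on even elements and a signed running difference; note A empties the caller's list while B does not mutate it (return value equivalence).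
import Mathlib
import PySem

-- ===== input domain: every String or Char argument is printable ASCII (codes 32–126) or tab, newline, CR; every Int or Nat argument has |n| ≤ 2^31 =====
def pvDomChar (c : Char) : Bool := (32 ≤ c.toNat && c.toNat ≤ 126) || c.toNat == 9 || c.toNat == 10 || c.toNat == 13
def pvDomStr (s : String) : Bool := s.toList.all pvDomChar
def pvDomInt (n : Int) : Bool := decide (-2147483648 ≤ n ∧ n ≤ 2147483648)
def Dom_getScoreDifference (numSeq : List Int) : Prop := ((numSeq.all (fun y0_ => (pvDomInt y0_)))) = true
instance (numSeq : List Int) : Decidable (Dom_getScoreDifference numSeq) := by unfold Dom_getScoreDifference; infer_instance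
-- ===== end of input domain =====

-- B replaces A's pop(0)/reverse() mutation loop by an O(n) two-pointer scan (A empties its
-- argument list in Python; B does not mutate it — the equivalence proved is about the return value).

-- ===== PORT A =====
-- while len(numSeq)!=0: score=pop(0); if even reverse; add to user1/user2 alternately
def goA : List Int → Int → Int → Int → Int
  | [], u1, u2, _ => u1 - u2
  | s :: rest, u1, u2, turn =>
    let rest' := if PySem.Int.mod s 2 == 0 then rest.reverse else rest
    if turn == 1 then goA rest' (u1 + s) u2 2 else goA rest' u1 (u2 + s) 1
  termination_by seq _ _ _ => seq.length
  decreasing_by all_goals simp [rest']; split <;> simp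

def getScoreDifference (numSeq : List Int) : Int := goA numSeq 0 0 1

-- ===== PORT B =====
-- two pointers lo/hi into the unchanged list, direction flag toggled on even x, signed sum
def goB (arr : List Int) (lo hi : Int) (forward : Bool) (diff sign : Int) : Int :=
  if h : lo ≤ hi then
    let x := (if forward then PySem.List.pyGet? arr lo else PySem.List.pyGet? arr hi).getD 0
    let forward' := if PySem.Int.mod x 2 == 0 then !forward else forward
    goB arr (if forward then lo + 1 else lo) (if forward then hi else hi - 1) forward'
      (diff + sign * x) (-sign)
  else diff
  termination_by (hi + 1 - lo).toNat
  decreasing_by all_goals by_cases hf : forward = true <;> simp [hf] <;> omega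

def getScoreDifference_alt (numSeq : List Int) : Int :=
  goB numSeq 0 ((numSeq.length : Int) - 1) true 0 1

-- ===== PRECONDITION & SPEC =====
def Spec_getScoreDifference (numSeq : List Int) (out : Int) : Prop := out = getScoreDifference_alt numSeq
instance (numSeq : List Int) (out : Int) : Decidable (Spec_getScoreDifference numSeq out) := by unfold Spec_getScoreDifference; infer_instance

-- ===== CLAIM (what is proved, stated in full; the proofs are below) =====
def Claim_equal_getScoreDifference : Prop := ∀ (numSeq : List Int), Dom_getScoreDifference numSeq → Spec_getScoreDifference numSeq (getScoreDifference numSeq)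

-- ===== LEMMAS AND PROOFS =====

-- middle model: remaining segment, running signed difference
def goM : List Int → Int → Int → Int
  | [], diff, _ => diff
  | s :: rest, diff, sign =>
    goM (if PySem.Int.mod s 2 == 0 then rest.reverse else rest) (diff + sign * s) (-sign)
  termination_by seq _ _ => seq.length
  decreasing_by split <;> simp

theorem goM_add : ∀ (n : Nat) (seg : List Int), seg.length = n → ∀ (d1 d2 sign : Int),
    goM seg (d1 + d2) sign = d1 + goM seg d2 sign := by
  intro n
  induction n with
  | zero => intro seg hlen d1 d2 sign; match seg, hlen with | [], _ => simp [goM]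
  | succ m ih =>
    intro seg hlen d1 d2 sign
    match seg, hlen with
    | s :: rest, hlen =>
      simp only [goM]
      rw [add_assoc, ih _ (by split <;> simp_all)]

theorem goA_eq : ∀ (n : Nat) (seg : List Int), seg.length = n → ∀ (u1 u2 : Int),
    goA seg u1 u2 1 = u1 - u2 + goM seg 0 1 ∧ goA seg u1 u2 2 = u1 - u2 + goM seg 0 (-1) := by
  intro n
  induction n with
  | zero => intro seg hlen u1 u2; match seg, hlen with | [], _ => simp [goA, goM]
  | succ m ih =>
    intro seg hlen u1 u2
    match seg, hlen with
    | s :: rest, hlen =>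
      have hr : (if PySem.Int.mod s 2 == 0 then rest.reverse else rest).length = m := by
        split <;> simp_all
      constructor
      · simp only [goA]
        rw [if_pos (show ((1:Int) == 1) = true from by decide), (ih _ hr (u1 + s) u2).2, goM]
        rw [show (0 : Int) + 1 * s = s + 0 by ring, goM_add _ _ hr]
        ring
      · simp only [goA]
        rw [if_neg (show ¬ ((2:Int) == 1) = true from by decide), (ih _ hr u1 (u2 + s)).1, goM]
        rw [show (0 : Int) + (-1) * s = -s + 0 by ring, goM_add _ _ hr]
        ring

-- the remaining segment of the two-pointer scan
def segOf (arr : List Int) (lo hi : Int) : List Int :=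
  (arr.drop lo.toNat).take (hi + 1 - lo).toNat

theorem goB_eq : ∀ (n : Nat) (arr : List Int) (lo hi : Int), (hi + 1 - lo).toNat = n →
    0 ≤ lo → hi < (arr.length : Int) → ∀ (forward : Bool) (diff sign : Int),
    goB arr lo hi forward diff sign =
      diff + goM (if forward then segOf arr lo hi else (segOf arr lo hi).reverse) 0 sign := by
  intro n
  induction n with
  | zero =>
    intro arr lo hi hn hlo hhi forward diff sign
    have h : ¬ lo ≤ hi := by omega
    rw [goB]
    simp [h, segOf, show (hi + 1 - lo).toNat = 0 from hn, goM]
  | succ m ih =>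
    intro arr lo hi hn hlo hhi forward diff sign
    have h : lo ≤ hi := by omega
    have hlt : lo.toNat < arr.length := by omega
    rw [goB, dif_pos h]
    by_cases hf : forward = true
    · subst hf
      have hx : (PySem.List.pyGet? arr lo).getD 0 = arr[lo.toNat] := by
        rw [PySem.List.pyGet?_of_nonneg arr hlo, List.getElem?_eq_getElem hlt]; rfl
      have hseg : segOf arr lo hi = arr[lo.toNat] :: segOf arr (lo + 1) hi := by
        unfold segOf
        rw [show (lo + 1).toNat = lo.toNat + 1 by omega,
            show (hi + 1 - lo).toNat = (hi + 1 - (lo + 1)).toNat + 1 by omega,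
            List.drop_eq_getElem_cons hlt, List.take_succ_cons]
      simp only [if_true, ite_true, hx, hseg]
      rw [ih arr (lo + 1) hi (by omega) (by omega) hhi]
      by_cases he : (PySem.Int.mod arr[lo.toNat] 2 == 0) = true
      · simp only [he, if_true, ite_true, Bool.not_true, if_false, Bool.false_eq_true, ite_false]
        rw [goM, if_pos he,
            show (0:Int) + sign * arr[lo.toNat] = sign * arr[lo.toNat] + 0 from by ring,
            goM_add _ _ rfl]
        ring
      · simp only [he, if_false, ite_false]
        rw [goM, if_neg he,
            show (0:Int) + sign * arr[lo.toNat] = sign * arr[lo.toNat] + 0 from by ring,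
            goM_add _ _ rfl]
        simp
        ring
    · have hf' : forward = false := by simpa using hf
      subst hf'
      have hhi0 : 0 ≤ hi := le_trans hlo h
      have hhlt : hi.toNat < arr.length := by omega
      have hx : (PySem.List.pyGet? arr hi).getD 0 = arr[hi.toNat] := by
        rw [PySem.List.pyGet?_of_nonneg arr hhi0, List.getElem?_eq_getElem hhlt]; rfl
      have hseg : segOf arr lo hi = segOf arr lo (hi - 1) ++ [arr[hi.toNat]] := by
        unfold segOf
        rw [show (hi + 1 - lo).toNat = (hi - 1 + 1 - lo).toNat + 1 by omega, List.take_succ]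
        congr 1
        rw [List.getElem?_drop,
            show lo.toNat + (hi - 1 + 1 - lo).toNat = hi.toNat by omega,
            List.getElem?_eq_getElem hhlt]
        rfl
      have hrev : (segOf arr lo hi).reverse = arr[hi.toNat] :: (segOf arr lo (hi - 1)).reverse := by
        rw [hseg]; simp
      simp only [Bool.false_eq_true, ite_false, if_false, Bool.not_false, hx, hrev]
      rw [ih arr lo (hi - 1) (by omega) hlo (by omega)]
      by_cases he : (PySem.Int.mod arr[hi.toNat] 2 == 0) = true
      · simp only [he, if_true, ite_true]
        rw [goM, if_pos he, List.reverse_reverse,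
            show (0:Int) + sign * arr[hi.toNat] = sign * arr[hi.toNat] + 0 from by ring,
            goM_add _ _ rfl]
        ring
      · simp only [he, if_false, ite_false]
        rw [goM, if_neg he,
            show (0:Int) + sign * arr[hi.toNat] = sign * arr[hi.toNat] + 0 from by ring,
            goM_add _ _ rfl]
        simp
        ring

theorem getScoreDifference_spec0 : ∀ (numSeq : List Int),
    getScoreDifference numSeq = getScoreDifference_alt numSeq := by
  intro numSeq
  unfold getScoreDifference getScoreDifference_alt
  rw [(goA_eq numSeq.length numSeq rfl 0 0).1,
      goB_eq (((numSeq.length : Int) - 1) + 1 - 0).toNat numSeq 0 ((numSeq.length : Int) - 1) rfl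
        (by omega) (by omega) true 0 1]
  simp [segOf]

-- ===== VERDICT (by name: the statement is the Claim_ definition above) =====
theorem getScoreDifference_spec : Claim_equal_getScoreDifference := by
  intro numSeq _
  exact getScoreDifference_spec0 numSeq
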